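-- pv_equiv track=rewrite | github.com/Lakshan4625D/it_assetMangementTool | netAssetDisc.py | identify_device_type
-- ===== SOURCE A (Python) =====
-- def identify_device_type(snmp_desc, nmap_os, ports, vendor):
--     joined_info = f"{snmp_desc or ''} {nmap_os or ''} {vendor or ''}".lower()
--     ports = [p.split('/')[0] for p in ports]  # extract port numbers only
--
--     def match_any(keywords):
--         return any(k in joined_info for k in keywords)
--
--     def vendor_match(vendors):
--         return vendor and any(v in vendor.lower() for v in vendors)
--
--     # Router / Gateway
--     if (match_any(['router', 'gateway', 'edge', 'firewall', 'broadband', 'cpe']) or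
--         any(p in ports for p in ['53', '1900', '500', '4500', '1701', '80', '443', '8080', '8443'])) and \
--        vendor_match(['arcadyan', 'cisco', 'd-link', 'tp-link', 'netgear', 'asus', 'zte', 'huawei']):
--         return "Router"
--
--     # Switch
--     if match_any(['switch', 'catalyst', 'layer 2', 'layer 3', 'dell', 'juniper']) or \
--        vendor_match(['cisco', 'juniper', 'dell', 'hp', 'netgear']):
--         return "Switch"
--
--     # Printer
--     if match_any(['printer', 'hp', 'canon', 'epson', 'xerox']) or any(p in ports for p in ['515', '631', '9100', '9101']):
--         return "Printer"
--
--     # PC / Workstation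
--     if match_any(['windows', 'linux', 'ubuntu', 'mac', 'microsoft', 'desktop']) or \
--        any(p in ports for p in ['22', '135', '139', '445', '3389']):
--         return "PC"
--
--     # IP Camera
--     if match_any(['camera', 'hikvision', 'dahua', 'ip camera', 'axis']) or any(p in ports for p in ['554', '8080', '37777', '5000', '5001']):
--         return "IP Camera"
--
--     # Access Point
--     if match_any(['access point', 'ap', 'aruba', 'unifi', 'wireless controller']) or \
--        any(p in ports for p in ['80', '443', '161', '22']):
--         return "Access Point"
--
--     # VoIP Phone
--     if match_any(['voip', 'sip', 'phone', 'polycom']) or any(p in ports for p in ['5060', '5061', '5062']):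
--         return "VoIP Phone"
--
--     # NAS (Network Storage)
--     if match_any(['nas', 'storage', 'synology', 'diskstation', 'qnap']) or any(p in ports for p in ['2049', '5000', '5001', '445', '139']):
--         return "NAS (Network Storage)"
--
--     # Firewall
--     if match_any(['firewall', 'palo alto', 'fortigate', 'checkpoint', 'juniper']):
--         return "Firewall"
--
--     # Smart TV
--     if match_any(['smart tv', 'samsung', 'lg', 'roku', 'android tv']) or any(p in ports for p in ['8008', '8009', '8443', '1935', '6970']):
--         return "Smart TV"
--
--     # IoT Device
--     if match_any(['iot', 'smart plug', 'esp8266', 'tuya', 'espressif', 'zigbee']):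
--         return "IoT Device"
--
--     # Game Console
--     if match_any(['xbox', 'playstation', 'nintendo', 'game console']) or any(p in ports for p in ['3074', '3478', '3479', '3480']):
--         return "Game Console"
--
--     # Media Server
--     if match_any(['plex', 'emby', 'jellyfin', 'media server']) or any(p in ports for p in ['32400', '8096', '9000']):
--         return "Media Server"
--
--     # Virtual Machine / Hypervisor
--     if match_any(['vmware', 'virtualbox', 'qemu', 'kvm', 'virtual machine', 'hyper-v']) or \
--        (vendor and 'vm' in vendor.lower()):
--         return "Virtual Machine"
--
--     return "Unknown"
-- ===== SOURCE B (Python) =====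
-- # Inverted-index re-implementation: instead of walking A's 14 if-blocks, flatten every
-- # keyword/port/vendor literal into (feature, rule-index) pairs, collect the SET of rule
-- # indices the input triggers in one pass per feature kind, and answer by the MINIMUM
-- # triggered index (rule 0, Router, is the only AND-combined rule and is tested from the
-- # same hit sets before the minimum is taken).
--
-- _LABELS = ["Router", "Switch", "Printer", "PC", "IP Camera", "Access Point",
--            "VoIP Phone", "NAS (Network Storage)", "Firewall", "Smart TV",
--            "IoT Device", "Game Console", "Media Server", "Virtual Machine"]
--
-- _KEYWORDS = [(k, i) for i, ks in enumerate([
--     ['router', 'gateway', 'edge', 'firewall', 'broadband', 'cpe'],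
--     ['switch', 'catalyst', 'layer 2', 'layer 3', 'dell', 'juniper'],
--     ['printer', 'hp', 'canon', 'epson', 'xerox'],
--     ['windows', 'linux', 'ubuntu', 'mac', 'microsoft', 'desktop'],
--     ['camera', 'hikvision', 'dahua', 'ip camera', 'axis'],
--     ['access point', 'ap', 'aruba', 'unifi', 'wireless controller'],
--     ['voip', 'sip', 'phone', 'polycom'],
--     ['nas', 'storage', 'synology', 'diskstation', 'qnap'],
--     ['firewall', 'palo alto', 'fortigate', 'checkpoint', 'juniper'],
--     ['smart tv', 'samsung', 'lg', 'roku', 'android tv'],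
--     ['iot', 'smart plug', 'esp8266', 'tuya', 'espressif', 'zigbee'],
--     ['xbox', 'playstation', 'nintendo', 'game console'],
--     ['plex', 'emby', 'jellyfin', 'media server'],
--     ['vmware', 'virtualbox', 'qemu', 'kvm', 'virtual machine', 'hyper-v'],
-- ]) for k in ks]
--
-- _PORTS = [(p, i) for i, ps in enumerate([
--     ['53', '1900', '500', '4500', '1701', '80', '443', '8080', '8443'],
--     [],
--     ['515', '631', '9100', '9101'],
--     ['22', '135', '139', '445', '3389'],
--     ['554', '8080', '37777', '5000', '5001'],
--     ['80', '443', '161', '22'],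
--     ['5060', '5061', '5062'],
--     ['2049', '5000', '5001', '445', '139'],
--     [],
--     ['8008', '8009', '8443', '1935', '6970'],
--     [],
--     ['3074', '3478', '3479', '3480'],
--     ['32400', '8096', '9000'],
--     [],
-- ]) for p in ps]
--
-- _VENDORS = [(v, i) for i, vs in enumerate([
--     ['arcadyan', 'cisco', 'd-link', 'tp-link', 'netgear', 'asus', 'zte', 'huawei'],
--     ['cisco', 'juniper', 'dell', 'hp', 'netgear'],
--     [], [], [], [], [], [], [], [], [], [], [],
--     ['vm'],
-- ]) for v in vs]
--
--
-- def identify_device_type(snmp_desc, nmap_os, ports, vendor):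
--     info = " ".join([snmp_desc or '', nmap_os or '', vendor or '']).lower()
--     port_nums = {p.split('/')[0] for p in ports}
--     vlow = (vendor or '').lower()
--     kw_hits = {i for k, i in _KEYWORDS if k in info}
--     port_hits = {i for q, i in _PORTS if q in port_nums}
--     ven_hits = {i for v, i in _VENDORS if v in vlow} if vendor else set()
--     if (0 in kw_hits or 0 in port_hits) and 0 in ven_hits:
--         return "Router"
--     best = min((i for i in kw_hits | port_hits | ven_hits if i >= 1), default=None)
--     return _LABELS[best] if best is not None else "Unknown"
-- ===== Notes on version B (the rewrite author's own statement) =====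
-- stated objective: faster
-- what changed: A walks 14 hand-written if-blocks re-testing keyword/port/vendor literals rule by rule with repeated list scans; B inverts this into a flat feature index of (literal, rule-index) pairs, computes the set of triggered rule indices in one pass per feature kind (port membership against a set built once), and selects the answer as the label of the minimum triggered index (rule 0's AND-with-vendor combination is tested from the same hit sets before taking the minimum).
import Mathlib
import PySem

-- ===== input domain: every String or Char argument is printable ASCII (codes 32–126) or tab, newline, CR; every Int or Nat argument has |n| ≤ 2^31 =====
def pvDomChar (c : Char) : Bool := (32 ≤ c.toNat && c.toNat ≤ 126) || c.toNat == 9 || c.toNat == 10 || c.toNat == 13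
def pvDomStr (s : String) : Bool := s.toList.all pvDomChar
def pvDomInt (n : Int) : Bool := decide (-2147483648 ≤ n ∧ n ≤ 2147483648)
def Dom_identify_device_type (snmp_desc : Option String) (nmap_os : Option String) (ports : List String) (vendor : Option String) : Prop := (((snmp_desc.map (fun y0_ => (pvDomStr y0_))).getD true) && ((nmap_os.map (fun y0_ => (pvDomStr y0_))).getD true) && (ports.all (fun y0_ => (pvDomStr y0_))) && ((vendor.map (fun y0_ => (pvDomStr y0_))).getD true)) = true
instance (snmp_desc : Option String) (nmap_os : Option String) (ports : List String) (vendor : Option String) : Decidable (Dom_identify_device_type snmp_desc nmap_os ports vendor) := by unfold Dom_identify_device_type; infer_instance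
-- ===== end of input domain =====

-- B replaces A's walk through 14 hand-written if-blocks by an inverted feature index:
-- every keyword/port/vendor literal is a (feature, rule-index) pair, the input yields
-- SETS of triggered rule indices, and the answer is the label of the MINIMUM triggered
-- index (rule 0, Router, the only AND-combined rule, is tested from the same hit sets
-- first).  Objective: faster by a constant factor (port lookups against a set built
-- once, no per-rule re-scans); same return value everywhere.

-- ===== PORT A =====
-- `x or ''` for an Option String: None gives '', Some '' gives '' (= itself), so it is getD ""
def pvOrEmpty (x : Option String) : String := x.getD ""

-- truthiness of the `vendor` argument: bool(None) = bool('') = False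
def pvTruthy : Option String → Bool
  | none => false
  | some s => !(s == "")

-- p.split('/')[0]; split with a non-empty separator always returns a non-empty list,
-- so the "" default branch is unreachable (no IndexError in Python)
def pvFirstField (p : String) : String :=
  match PySem.Str.split? p "/" with
  | some (h :: _) => h
  | _ => ""

def identify_device_type (snmp_desc : Option String) (nmap_os : Option String) (ports : List String) (vendor : Option String) : String :=
  let joined_info := PySem.Str.lower (pvOrEmpty snmp_desc ++ " " ++ pvOrEmpty nmap_os ++ " " ++ pvOrEmpty vendor)
  let ports := ports.map pvFirstField
  let match_any := fun (keywords : List String) => keywords.any (fun k => PySem.Str.isIn k joined_info)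
  let vendor_match := fun (vendors : List String) =>
    pvTruthy vendor && vendors.any (fun v => PySem.Str.isIn v (PySem.Str.lower (pvOrEmpty vendor)))
  if (match_any ["router", "gateway", "edge", "firewall", "broadband", "cpe"] ||
      ["53", "1900", "500", "4500", "1701", "80", "443", "8080", "8443"].any (fun p => ports.contains p)) &&
     vendor_match ["arcadyan", "cisco", "d-link", "tp-link", "netgear", "asus", "zte", "huawei"] then "Router"
  else if match_any ["switch", "catalyst", "layer 2", "layer 3", "dell", "juniper"] ||
          vendor_match ["cisco", "juniper", "dell", "hp", "netgear"] then "Switch"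
  else if match_any ["printer", "hp", "canon", "epson", "xerox"] ||
          ["515", "631", "9100", "9101"].any (fun p => ports.contains p) then "Printer"
  else if match_any ["windows", "linux", "ubuntu", "mac", "microsoft", "desktop"] ||
          ["22", "135", "139", "445", "3389"].any (fun p => ports.contains p) then "PC"
  else if match_any ["camera", "hikvision", "dahua", "ip camera", "axis"] ||
          ["554", "8080", "37777", "5000", "5001"].any (fun p => ports.contains p) then "IP Camera"
  else if match_any ["access point", "ap", "aruba", "unifi", "wireless controller"] ||
          ["80", "443", "161", "22"].any (fun p => ports.contains p) then "Access Point"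
  else if match_any ["voip", "sip", "phone", "polycom"] ||
          ["5060", "5061", "5062"].any (fun p => ports.contains p) then "VoIP Phone"
  else if match_any ["nas", "storage", "synology", "diskstation", "qnap"] ||
          ["2049", "5000", "5001", "445", "139"].any (fun p => ports.contains p) then "NAS (Network Storage)"
  else if match_any ["firewall", "palo alto", "fortigate", "checkpoint", "juniper"] then "Firewall"
  else if match_any ["smart tv", "samsung", "lg", "roku", "android tv"] ||
          ["8008", "8009", "8443", "1935", "6970"].any (fun p => ports.contains p) then "Smart TV"
  else if match_any ["iot", "smart plug", "esp8266", "tuya", "espressif", "zigbee"] then "IoT Device"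
  else if match_any ["xbox", "playstation", "nintendo", "game console"] ||
          ["3074", "3478", "3479", "3480"].any (fun p => ports.contains p) then "Game Console"
  else if match_any ["plex", "emby", "jellyfin", "media server"] ||
          ["32400", "8096", "9000"].any (fun p => ports.contains p) then "Media Server"
  else if match_any ["vmware", "virtualbox", "qemu", "kvm", "virtual machine", "hyper-v"] ||
          (pvTruthy vendor && PySem.Str.isIn "vm" (PySem.Str.lower (pvOrEmpty vendor))) then "Virtual Machine"
  else "Unknown"

-- ===== PORT B =====
-- rule labels, indexed 0..13
def pvLabels : List String :=
  ["Router", "Switch", "Printer", "PC", "IP Camera", "Access Point", "VoIP Phone",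
   "NAS (Network Storage)", "Firewall", "Smart TV", "IoT Device", "Game Console",
   "Media Server", "Virtual Machine"]

-- flat (keyword, rule-index) pairs = Source B's _KEYWORDS
def pvKwFeat : List (String × Int) :=
  [("router", 0), ("gateway", 0), ("edge", 0), ("firewall", 0), ("broadband", 0), ("cpe", 0),
   ("switch", 1), ("catalyst", 1), ("layer 2", 1), ("layer 3", 1), ("dell", 1), ("juniper", 1),
   ("printer", 2), ("hp", 2), ("canon", 2), ("epson", 2), ("xerox", 2),
   ("windows", 3), ("linux", 3), ("ubuntu", 3), ("mac", 3), ("microsoft", 3), ("desktop", 3),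
   ("camera", 4), ("hikvision", 4), ("dahua", 4), ("ip camera", 4), ("axis", 4),
   ("access point", 5), ("ap", 5), ("aruba", 5), ("unifi", 5), ("wireless controller", 5),
   ("voip", 6), ("sip", 6), ("phone", 6), ("polycom", 6),
   ("nas", 7), ("storage", 7), ("synology", 7), ("diskstation", 7), ("qnap", 7),
   ("firewall", 8), ("palo alto", 8), ("fortigate", 8), ("checkpoint", 8), ("juniper", 8),
   ("smart tv", 9), ("samsung", 9), ("lg", 9), ("roku", 9), ("android tv", 9),
   ("iot", 10), ("smart plug", 10), ("esp8266", 10), ("tuya", 10), ("espressif", 10), ("zigbee", 10),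
   ("xbox", 11), ("playstation", 11), ("nintendo", 11), ("game console", 11),
   ("plex", 12), ("emby", 12), ("jellyfin", 12), ("media server", 12),
   ("vmware", 13), ("virtualbox", 13), ("qemu", 13), ("kvm", 13), ("virtual machine", 13), ("hyper-v", 13)]

-- flat (port, rule-index) pairs = Source B's _PORTS
def pvPortFeat : List (String × Int) :=
  [("53", 0), ("1900", 0), ("500", 0), ("4500", 0), ("1701", 0), ("80", 0), ("443", 0), ("8080", 0), ("8443", 0),
   ("515", 2), ("631", 2), ("9100", 2), ("9101", 2),
   ("22", 3), ("135", 3), ("139", 3), ("445", 3), ("3389", 3),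
   ("554", 4), ("8080", 4), ("37777", 4), ("5000", 4), ("5001", 4),
   ("80", 5), ("443", 5), ("161", 5), ("22", 5),
   ("5060", 6), ("5061", 6), ("5062", 6),
   ("2049", 7), ("5000", 7), ("5001", 7), ("445", 7), ("139", 7),
   ("8008", 9), ("8009", 9), ("8443", 9), ("1935", 9), ("6970", 9),
   ("3074", 11), ("3478", 11), ("3479", 11), ("3480", 11),
   ("32400", 12), ("8096", 12), ("9000", 12)]

-- flat (vendor-substring, rule-index) pairs = Source B's _VENDORS
def pvVenFeat : List (String × Int) :=
  [("arcadyan", 0), ("cisco", 0), ("d-link", 0), ("tp-link", 0), ("netgear", 0), ("asus", 0), ("zte", 0), ("huawei", 0),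
   ("cisco", 1), ("juniper", 1), ("dell", 1), ("hp", 1), ("netgear", 1),
   ("vm", 13)]

-- Source B's _hits: {i for f, i in feats if test(f)} — the set of rule indices whose feature fires
def pvHits (feats : List (String × Int)) (test : String → Bool) : PySem.Set Int :=
  PySem.Set.ofList ((feats.filter (fun f => test f.1)).map (fun f => f.2))

def identify_device_type_alt (snmp_desc : Option String) (nmap_os : Option String) (ports : List String) (vendor : Option String) : String :=
  let info := PySem.Str.lower (PySem.Str.join " " [pvOrEmpty snmp_desc, pvOrEmpty nmap_os, pvOrEmpty vendor])
  let portNums := PySem.Set.ofList (ports.map pvFirstField)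
  let vlow := PySem.Str.lower (pvOrEmpty vendor)
  let kwHits := pvHits pvKwFeat (fun k => PySem.Str.isIn k info)
  let portHits := pvHits pvPortFeat (fun q => PySem.Set.contains portNums q)
  let venHits := if pvTruthy vendor then pvHits pvVenFeat (fun v => PySem.Str.isIn v vlow) else PySem.Set.ofList []
  if (PySem.Set.contains kwHits 0 || PySem.Set.contains portHits 0) && PySem.Set.contains venHits 0 then "Router"
  else
    -- min((i for i in kw_hits | port_hits | ven_hits if i >= 1), default=None): the minimum
    -- of an int set is order-independent, so consuming the Set's elements here is exact
    match PySem.List.min? ((PySem.Set.union (PySem.Set.union kwHits portHits) venHits).filter (fun i => decide (1 ≤ i))) (fun x => x) with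
    | some i => PySem.List.pyGetD pvLabels i "Unknown"   -- every hit index is within 0..13, so Python's _LABELS[best] never raises
    | none => "Unknown"

-- ===== PRECONDITION & SPEC =====
def Spec_identify_device_type (snmp_desc : Option String) (nmap_os : Option String) (ports : List String) (vendor : Option String) (out : String) : Prop := out = identify_device_type_alt snmp_desc nmap_os ports vendor
instance (snmp_desc : Option String) (nmap_os : Option String) (ports : List String) (vendor : Option String) (out : String) : Decidable (Spec_identify_device_type snmp_desc nmap_os ports vendor out) := by unfold Spec_identify_device_type; infer_instance

-- ===== CLAIM (what is proved, stated in full; the proofs are below) =====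
def Claim_equal_identify_device_type : Prop := ∀ (snmp_desc : Option String) (nmap_os : Option String) (ports : List String) (vendor : Option String), Dom_identify_device_type snmp_desc nmap_os ports vendor → Spec_identify_device_type snmp_desc nmap_os ports vendor (identify_device_type snmp_desc nmap_os ports vendor)

-- ===== LEMMAS AND PROOFS =====
theorem pv_join_three (a b c : String) : PySem.Str.join " " [a, b, c] = a ++ " " ++ b ++ " " ++ c := by
  simp [PySem.Str.join, PySem.Chars.join, String.ext_iff, List.intercalate]

theorem pv_set_contains (xs : List String) (q : String) :
    PySem.Set.contains (PySem.Set.ofList xs) q = xs.contains q := by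
  simp [PySem.Set.mem_ofList]

-- membership in a hit set, as a proposition over the flat feature table
theorem pv_mem_pvHits (feats : List (String × Int)) (test : String → Bool) (x : Int) :
    x ∈ pvHits feats test ↔ ∃ f ∈ feats, test f.1 = true ∧ f.2 = x := by
  simp [pvHits, PySem.Set.mem_ofList, List.mem_filter]

-- min of a list = first element of a sorted superlist that occurs in it
theorem pv_min?_eq_of (c : List Int) (k : Int) (hk : k ∈ c) (hlb : ∀ x ∈ c, k ≤ x) :
    PySem.List.min? c (fun x => x) = some k := by
  rcases h : PySem.List.min? c (fun x => x) with _ | m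
  · rw [PySem.List.min?_eq_none_iff] at h; subst h; cases hk
  · have hm := PySem.List.min?_mem h
    have h1 := PySem.List.min?_isMin h k hk
    have h2 := hlb m hm
    simp only [] at h1
    have : m = k := le_antisymm h1 h2
    rw [this]

theorem pv_min?_eq_find? (cand : List Int) (hp : cand.Pairwise (· < ·)) :
    ∀ (c : List Int), (∀ x ∈ c, x ∈ cand) →
      PySem.List.min? c (fun x => x) = cand.find? (fun i => decide (i ∈ c)) := by
  induction cand with
  | nil =>
    intro c hsub
    have : c = [] := List.eq_nil_iff_forall_not_mem.mpr (fun x hx => by cases hsub x hx)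
    subst this; simp [PySem.List.min?_eq_none_iff]
  | cons a rest ih =>
    intro c hsub
    rcases List.pairwise_cons.mp hp with ⟨ha, hrest⟩
    by_cases hac : a ∈ c
    · rw [pv_min?_eq_of c a hac]
      · simp [List.find?, hac]
      · intro x hx
        rcases List.mem_cons.mp (hsub x hx) with h | h
        · omega
        · exact le_of_lt (ha x h)
    · have : PySem.List.min? c (fun x => x) = rest.find? (fun i => decide (i ∈ c)) := by
        apply ih hrest
        intro x hx
        rcases List.mem_cons.mp (hsub x hx) with h | h
        · exact absurd (h ▸ hx) hac
        · exact h
      rw [this]; simp [List.find?, hac]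

theorem pv_contains_hits (feats : List (String × Int)) (test : String → Bool) (k : Int) :
    PySem.Set.contains (pvHits feats test) k = ((feats.filter (fun f => f.2 == k)).map (fun f => f.1)).any test := by
  apply Bool.eq_iff_iff.mpr
  simp [pv_mem_pvHits, List.any_eq_true]

theorem pv_mem_hits_iff (feats : List (String × Int)) (test : String → Bool) (k : Int) :
    k ∈ pvHits feats test ↔ ((feats.filter (fun f => f.2 == k)).map (fun f => f.1)).any test = true := by
  rw [← PySem.Set.contains_iff, pv_contains_hits]



theorem pv_kw_bound : ∀ f ∈ pvKwFeat, f.2 ∈ ([0,1,2,3,4,5,6,7,8,9,10,11,12,13] : List Int) := by decide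
theorem pv_pt_bound : ∀ f ∈ pvPortFeat, f.2 ∈ ([0,1,2,3,4,5,6,7,8,9,10,11,12,13] : List Int) := by decide
theorem pv_vn_bound : ∀ f ∈ pvVenFeat, f.2 ∈ ([0,1,2,3,4,5,6,7,8,9,10,11,12,13] : List Int) := by decide

theorem pv_main (snmp_desc nmap_os vendor : Option String) (ports : List String) :
    identify_device_type snmp_desc nmap_os ports vendor = identify_device_type_alt snmp_desc nmap_os ports vendor := by
  unfold identify_device_type identify_device_type_alt
  rw [pv_join_three]
  set info := PySem.Str.lower (pvOrEmpty snmp_desc ++ " " ++ pvOrEmpty nmap_os ++ " " ++ pvOrEmpty vendor) with hinfo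
  set vlow := PySem.Str.lower (pvOrEmpty vendor) with hvlow
  set pl := ports.map pvFirstField with hpl
  dsimp only
  simp only [pv_set_contains]
  cases ht : pvTruthy vendor
  case false =>
    simp only [Bool.false_and, Bool.and_false, Bool.or_false, Bool.false_eq_true, if_false]
    have hven0 : PySem.Set.contains (PySem.Set.ofList ([] : List Int)) (0 : Int) = false := rfl
    simp only [hven0, Bool.and_false, Bool.false_eq_true, if_false]
    have ckw1 : (pvKwFeat.filter (fun f => f.2 == (1 : Int))).map (fun f => f.1) = ["switch", "catalyst", "layer 2", "layer 3", "dell", "juniper"] := by rfl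
    have cpt1 : (pvPortFeat.filter (fun f => f.2 == (1 : Int))).map (fun f => f.1) = [] := by rfl
    have ckw2 : (pvKwFeat.filter (fun f => f.2 == (2 : Int))).map (fun f => f.1) = ["printer", "hp", "canon", "epson", "xerox"] := by rfl
    have cpt2 : (pvPortFeat.filter (fun f => f.2 == (2 : Int))).map (fun f => f.1) = ["515", "631", "9100", "9101"] := by rfl
    have ckw3 : (pvKwFeat.filter (fun f => f.2 == (3 : Int))).map (fun f => f.1) = ["windows", "linux", "ubuntu", "mac", "microsoft", "desktop"] := by rfl
    have cpt3 : (pvPortFeat.filter (fun f => f.2 == (3 : Int))).map (fun f => f.1) = ["22", "135", "139", "445", "3389"] := by rfl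
    have ckw4 : (pvKwFeat.filter (fun f => f.2 == (4 : Int))).map (fun f => f.1) = ["camera", "hikvision", "dahua", "ip camera", "axis"] := by rfl
    have cpt4 : (pvPortFeat.filter (fun f => f.2 == (4 : Int))).map (fun f => f.1) = ["554", "8080", "37777", "5000", "5001"] := by rfl
    have ckw5 : (pvKwFeat.filter (fun f => f.2 == (5 : Int))).map (fun f => f.1) = ["access point", "ap", "aruba", "unifi", "wireless controller"] := by rfl
    have cpt5 : (pvPortFeat.filter (fun f => f.2 == (5 : Int))).map (fun f => f.1) = ["80", "443", "161", "22"] := by rfl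
    have ckw6 : (pvKwFeat.filter (fun f => f.2 == (6 : Int))).map (fun f => f.1) = ["voip", "sip", "phone", "polycom"] := by rfl
    have cpt6 : (pvPortFeat.filter (fun f => f.2 == (6 : Int))).map (fun f => f.1) = ["5060", "5061", "5062"] := by rfl
    have ckw7 : (pvKwFeat.filter (fun f => f.2 == (7 : Int))).map (fun f => f.1) = ["nas", "storage", "synology", "diskstation", "qnap"] := by rfl
    have cpt7 : (pvPortFeat.filter (fun f => f.2 == (7 : Int))).map (fun f => f.1) = ["2049", "5000", "5001", "445", "139"] := by rfl
    have ckw8 : (pvKwFeat.filter (fun f => f.2 == (8 : Int))).map (fun f => f.1) = ["firewall", "palo alto", "fortigate", "checkpoint", "juniper"] := by rfl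
    have cpt8 : (pvPortFeat.filter (fun f => f.2 == (8 : Int))).map (fun f => f.1) = [] := by rfl
    have ckw9 : (pvKwFeat.filter (fun f => f.2 == (9 : Int))).map (fun f => f.1) = ["smart tv", "samsung", "lg", "roku", "android tv"] := by rfl
    have cpt9 : (pvPortFeat.filter (fun f => f.2 == (9 : Int))).map (fun f => f.1) = ["8008", "8009", "8443", "1935", "6970"] := by rfl
    have ckw10 : (pvKwFeat.filter (fun f => f.2 == (10 : Int))).map (fun f => f.1) = ["iot", "smart plug", "esp8266", "tuya", "espressif", "zigbee"] := by rfl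
    have cpt10 : (pvPortFeat.filter (fun f => f.2 == (10 : Int))).map (fun f => f.1) = [] := by rfl
    have ckw11 : (pvKwFeat.filter (fun f => f.2 == (11 : Int))).map (fun f => f.1) = ["xbox", "playstation", "nintendo", "game console"] := by rfl
    have cpt11 : (pvPortFeat.filter (fun f => f.2 == (11 : Int))).map (fun f => f.1) = ["3074", "3478", "3479", "3480"] := by rfl
    have ckw12 : (pvKwFeat.filter (fun f => f.2 == (12 : Int))).map (fun f => f.1) = ["plex", "emby", "jellyfin", "media server"] := by rfl
    have cpt12 : (pvPortFeat.filter (fun f => f.2 == (12 : Int))).map (fun f => f.1) = ["32400", "8096", "9000"] := by rfl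
    have ckw13 : (pvKwFeat.filter (fun f => f.2 == (13 : Int))).map (fun f => f.1) = ["vmware", "virtualbox", "qemu", "kvm", "virtual machine", "hyper-v"] := by rfl
    have cpt13 : (pvPortFeat.filter (fun f => f.2 == (13 : Int))).map (fun f => f.1) = [] := by rfl
    have hsub : ∀ x ∈ (List.filter (fun i => decide (1 ≤ i)) (((pvHits pvKwFeat fun k => PySem.Str.isIn k info).union (pvHits pvPortFeat fun q => pl.contains q)).union (PySem.Set.ofList ([] : List Int)))), x ∈ ([1,2,3,4,5,6,7,8,9,10,11,12,13] : List Int) := by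
      intro x hx
      rw [List.mem_filter] at hx
      obtain ⟨hx, hx1⟩ := hx
      rw [PySem.Set.mem_union, PySem.Set.mem_union] at hx
      have hb : x ∈ ([0,1,2,3,4,5,6,7,8,9,10,11,12,13] : List Int) := by
        rcases hx with (h | h) | h
        · rcases (pv_mem_pvHits _ _ _).mp h with ⟨f, hf, _, hfx⟩
          exact hfx ▸ pv_kw_bound f hf
        · rcases (pv_mem_pvHits _ _ _).mp h with ⟨f, hf, _, hfx⟩
          exact hfx ▸ pv_pt_bound f hf
        · simp [PySem.Set.ofList] at h
      simp only [List.mem_cons, List.not_mem_nil, or_false] at hb ⊢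
      simp only [decide_eq_true_eq] at hx1
      omega
    have hfind := pv_min?_eq_find? ([1,2,3,4,5,6,7,8,9,10,11,12,13] : List Int) (by decide) (List.filter (fun i => decide (1 ≤ i)) (((pvHits pvKwFeat fun k => PySem.Str.isIn k info).union (pvHits pvPortFeat fun q => pl.contains q)).union (PySem.Set.ofList ([] : List Int)))) hsub
    have d1 : decide ((1 : Int) ∈ (List.filter (fun i => decide (1 ≤ i)) (((pvHits pvKwFeat fun k => PySem.Str.isIn k info).union (pvHits pvPortFeat fun q => pl.contains q)).union (PySem.Set.ofList ([] : List Int))))) = ((["switch", "catalyst", "layer 2", "layer 3", "dell", "juniper"].any fun k => PySem.Str.isIn k info)) := by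
      apply Bool.eq_iff_iff.mpr
      simp only [decide_eq_true_eq, List.mem_filter, PySem.Set.mem_union, pv_mem_hits_iff, ckw1, cpt1]
      simp [PySem.Set.ofList]
      try tauto
    have d2 : decide ((2 : Int) ∈ (List.filter (fun i => decide (1 ≤ i)) (((pvHits pvKwFeat fun k => PySem.Str.isIn k info).union (pvHits pvPortFeat fun q => pl.contains q)).union (PySem.Set.ofList ([] : List Int))))) = ((["printer", "hp", "canon", "epson", "xerox"].any fun k => PySem.Str.isIn k info) || (["515", "631", "9100", "9101"].any fun p => pl.contains p)) := by
      apply Bool.eq_iff_iff.mpr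
      simp only [decide_eq_true_eq, List.mem_filter, PySem.Set.mem_union, pv_mem_hits_iff, ckw2, cpt2]
      simp [PySem.Set.ofList]
      try tauto
    have d3 : decide ((3 : Int) ∈ (List.filter (fun i => decide (1 ≤ i)) (((pvHits pvKwFeat fun k => PySem.Str.isIn k info).union (pvHits pvPortFeat fun q => pl.contains q)).union (PySem.Set.ofList ([] : List Int))))) = ((["windows", "linux", "ubuntu", "mac", "microsoft", "desktop"].any fun k => PySem.Str.isIn k info) || (["22", "135", "139", "445", "3389"].any fun p => pl.contains p)) := by
      apply Bool.eq_iff_iff.mpr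
      simp only [decide_eq_true_eq, List.mem_filter, PySem.Set.mem_union, pv_mem_hits_iff, ckw3, cpt3]
      simp [PySem.Set.ofList]
      try tauto
    have d4 : decide ((4 : Int) ∈ (List.filter (fun i => decide (1 ≤ i)) (((pvHits pvKwFeat fun k => PySem.Str.isIn k info).union (pvHits pvPortFeat fun q => pl.contains q)).union (PySem.Set.ofList ([] : List Int))))) = ((["camera", "hikvision", "dahua", "ip camera", "axis"].any fun k => PySem.Str.isIn k info) || (["554", "8080", "37777", "5000", "5001"].any fun p => pl.contains p)) := by
      apply Bool.eq_iff_iff.mpr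
      simp only [decide_eq_true_eq, List.mem_filter, PySem.Set.mem_union, pv_mem_hits_iff, ckw4, cpt4]
      simp [PySem.Set.ofList]
      try tauto
    have d5 : decide ((5 : Int) ∈ (List.filter (fun i => decide (1 ≤ i)) (((pvHits pvKwFeat fun k => PySem.Str.isIn k info).union (pvHits pvPortFeat fun q => pl.contains q)).union (PySem.Set.ofList ([] : List Int))))) = ((["access point", "ap", "aruba", "unifi", "wireless controller"].any fun k => PySem.Str.isIn k info) || (["80", "443", "161", "22"].any fun p => pl.contains p)) := by
      apply Bool.eq_iff_iff.mpr
      simp only [decide_eq_true_eq, List.mem_filter, PySem.Set.mem_union, pv_mem_hits_iff, ckw5, cpt5]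
      simp [PySem.Set.ofList]
      try tauto
    have d6 : decide ((6 : Int) ∈ (List.filter (fun i => decide (1 ≤ i)) (((pvHits pvKwFeat fun k => PySem.Str.isIn k info).union (pvHits pvPortFeat fun q => pl.contains q)).union (PySem.Set.ofList ([] : List Int))))) = ((["voip", "sip", "phone", "polycom"].any fun k => PySem.Str.isIn k info) || (["5060", "5061", "5062"].any fun p => pl.contains p)) := by
      apply Bool.eq_iff_iff.mpr
      simp only [decide_eq_true_eq, List.mem_filter, PySem.Set.mem_union, pv_mem_hits_iff, ckw6, cpt6]
      simp [PySem.Set.ofList]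
      try tauto
    have d7 : decide ((7 : Int) ∈ (List.filter (fun i => decide (1 ≤ i)) (((pvHits pvKwFeat fun k => PySem.Str.isIn k info).union (pvHits pvPortFeat fun q => pl.contains q)).union (PySem.Set.ofList ([] : List Int))))) = ((["nas", "storage", "synology", "diskstation", "qnap"].any fun k => PySem.Str.isIn k info) || (["2049", "5000", "5001", "445", "139"].any fun p => pl.contains p)) := by
      apply Bool.eq_iff_iff.mpr
      simp only [decide_eq_true_eq, List.mem_filter, PySem.Set.mem_union, pv_mem_hits_iff, ckw7, cpt7]
      simp [PySem.Set.ofList]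
      try tauto
    have d8 : decide ((8 : Int) ∈ (List.filter (fun i => decide (1 ≤ i)) (((pvHits pvKwFeat fun k => PySem.Str.isIn k info).union (pvHits pvPortFeat fun q => pl.contains q)).union (PySem.Set.ofList ([] : List Int))))) = ((["firewall", "palo alto", "fortigate", "checkpoint", "juniper"].any fun k => PySem.Str.isIn k info)) := by
      apply Bool.eq_iff_iff.mpr
      simp only [decide_eq_true_eq, List.mem_filter, PySem.Set.mem_union, pv_mem_hits_iff, ckw8, cpt8]
      simp [PySem.Set.ofList]
      try tauto
    have d9 : decide ((9 : Int) ∈ (List.filter (fun i => decide (1 ≤ i)) (((pvHits pvKwFeat fun k => PySem.Str.isIn k info).union (pvHits pvPortFeat fun q => pl.contains q)).union (PySem.Set.ofList ([] : List Int))))) = ((["smart tv", "samsung", "lg", "roku", "android tv"].any fun k => PySem.Str.isIn k info) || (["8008", "8009", "8443", "1935", "6970"].any fun p => pl.contains p)) := by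
      apply Bool.eq_iff_iff.mpr
      simp only [decide_eq_true_eq, List.mem_filter, PySem.Set.mem_union, pv_mem_hits_iff, ckw9, cpt9]
      simp [PySem.Set.ofList]
      try tauto
    have d10 : decide ((10 : Int) ∈ (List.filter (fun i => decide (1 ≤ i)) (((pvHits pvKwFeat fun k => PySem.Str.isIn k info).union (pvHits pvPortFeat fun q => pl.contains q)).union (PySem.Set.ofList ([] : List Int))))) = ((["iot", "smart plug", "esp8266", "tuya", "espressif", "zigbee"].any fun k => PySem.Str.isIn k info)) := by
      apply Bool.eq_iff_iff.mpr
      simp only [decide_eq_true_eq, List.mem_filter, PySem.Set.mem_union, pv_mem_hits_iff, ckw10, cpt10]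
      simp [PySem.Set.ofList]
      try tauto
    have d11 : decide ((11 : Int) ∈ (List.filter (fun i => decide (1 ≤ i)) (((pvHits pvKwFeat fun k => PySem.Str.isIn k info).union (pvHits pvPortFeat fun q => pl.contains q)).union (PySem.Set.ofList ([] : List Int))))) = ((["xbox", "playstation", "nintendo", "game console"].any fun k => PySem.Str.isIn k info) || (["3074", "3478", "3479", "3480"].any fun p => pl.contains p)) := by
      apply Bool.eq_iff_iff.mpr
      simp only [decide_eq_true_eq, List.mem_filter, PySem.Set.mem_union, pv_mem_hits_iff, ckw11, cpt11]
      simp [PySem.Set.ofList]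
      try tauto
    have d12 : decide ((12 : Int) ∈ (List.filter (fun i => decide (1 ≤ i)) (((pvHits pvKwFeat fun k => PySem.Str.isIn k info).union (pvHits pvPortFeat fun q => pl.contains q)).union (PySem.Set.ofList ([] : List Int))))) = ((["plex", "emby", "jellyfin", "media server"].any fun k => PySem.Str.isIn k info) || (["32400", "8096", "9000"].any fun p => pl.contains p)) := by
      apply Bool.eq_iff_iff.mpr
      simp only [decide_eq_true_eq, List.mem_filter, PySem.Set.mem_union, pv_mem_hits_iff, ckw12, cpt12]
      simp [PySem.Set.ofList]
      try tauto
    have d13 : decide ((13 : Int) ∈ (List.filter (fun i => decide (1 ≤ i)) (((pvHits pvKwFeat fun k => PySem.Str.isIn k info).union (pvHits pvPortFeat fun q => pl.contains q)).union (PySem.Set.ofList ([] : List Int))))) = ((["vmware", "virtualbox", "qemu", "kvm", "virtual machine", "hyper-v"].any fun k => PySem.Str.isIn k info)) := by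
      apply Bool.eq_iff_iff.mpr
      simp only [decide_eq_true_eq, List.mem_filter, PySem.Set.mem_union, pv_mem_hits_iff, ckw13, cpt13]
      simp [PySem.Set.ofList]
      try tauto
    rw [hfind]
    simp only [List.find?]
    simp only [d1, d2, d3, d4, d5, d6, d7, d8, d9, d10, d11, d12, d13]
    by_cases h1 : ((["switch", "catalyst", "layer 2", "layer 3", "dell", "juniper"].any fun k => PySem.Str.isIn k info)) = true
    case pos =>
      simp only [h1, eq_self_iff_true, if_true]
      rfl
    rw [Bool.not_eq_true] at h1
    simp only [h1, Bool.false_eq_true, if_false]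
    by_cases h2 : ((["printer", "hp", "canon", "epson", "xerox"].any fun k => PySem.Str.isIn k info) || (["515", "631", "9100", "9101"].any fun p => pl.contains p)) = true
    case pos =>
      simp only [h2, eq_self_iff_true, if_true]
      rfl
    rw [Bool.not_eq_true] at h2
    simp only [h2, Bool.false_eq_true, if_false]
    by_cases h3 : ((["windows", "linux", "ubuntu", "mac", "microsoft", "desktop"].any fun k => PySem.Str.isIn k info) || (["22", "135", "139", "445", "3389"].any fun p => pl.contains p)) = true
    case pos =>
      simp only [h3, eq_self_iff_true, if_true]
      rfl
    rw [Bool.not_eq_true] at h3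
    simp only [h3, Bool.false_eq_true, if_false]
    by_cases h4 : ((["camera", "hikvision", "dahua", "ip camera", "axis"].any fun k => PySem.Str.isIn k info) || (["554", "8080", "37777", "5000", "5001"].any fun p => pl.contains p)) = true
    case pos =>
      simp only [h4, eq_self_iff_true, if_true]
      rfl
    rw [Bool.not_eq_true] at h4
    simp only [h4, Bool.false_eq_true, if_false]
    by_cases h5 : ((["access point", "ap", "aruba", "unifi", "wireless controller"].any fun k => PySem.Str.isIn k info) || (["80", "443", "161", "22"].any fun p => pl.contains p)) = true
    case pos =>
      simp only [h5, eq_self_iff_true, if_true]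
      rfl
    rw [Bool.not_eq_true] at h5
    simp only [h5, Bool.false_eq_true, if_false]
    by_cases h6 : ((["voip", "sip", "phone", "polycom"].any fun k => PySem.Str.isIn k info) || (["5060", "5061", "5062"].any fun p => pl.contains p)) = true
    case pos =>
      simp only [h6, eq_self_iff_true, if_true]
      rfl
    rw [Bool.not_eq_true] at h6
    simp only [h6, Bool.false_eq_true, if_false]
    by_cases h7 : ((["nas", "storage", "synology", "diskstation", "qnap"].any fun k => PySem.Str.isIn k info) || (["2049", "5000", "5001", "445", "139"].any fun p => pl.contains p)) = true
    case pos =>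
      simp only [h7, eq_self_iff_true, if_true]
      rfl
    rw [Bool.not_eq_true] at h7
    simp only [h7, Bool.false_eq_true, if_false]
    by_cases h8 : ((["firewall", "palo alto", "fortigate", "checkpoint", "juniper"].any fun k => PySem.Str.isIn k info)) = true
    case pos =>
      simp only [h8, eq_self_iff_true, if_true]
      rfl
    rw [Bool.not_eq_true] at h8
    simp only [h8, Bool.false_eq_true, if_false]
    by_cases h9 : ((["smart tv", "samsung", "lg", "roku", "android tv"].any fun k => PySem.Str.isIn k info) || (["8008", "8009", "8443", "1935", "6970"].any fun p => pl.contains p)) = true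
    case pos =>
      simp only [h9, eq_self_iff_true, if_true]
      rfl
    rw [Bool.not_eq_true] at h9
    simp only [h9, Bool.false_eq_true, if_false]
    by_cases h10 : ((["iot", "smart plug", "esp8266", "tuya", "espressif", "zigbee"].any fun k => PySem.Str.isIn k info)) = true
    case pos =>
      simp only [h10, eq_self_iff_true, if_true]
      rfl
    rw [Bool.not_eq_true] at h10
    simp only [h10, Bool.false_eq_true, if_false]
    by_cases h11 : ((["xbox", "playstation", "nintendo", "game console"].any fun k => PySem.Str.isIn k info) || (["3074", "3478", "3479", "3480"].any fun p => pl.contains p)) = true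
    case pos =>
      simp only [h11, eq_self_iff_true, if_true]
      rfl
    rw [Bool.not_eq_true] at h11
    simp only [h11, Bool.false_eq_true, if_false]
    by_cases h12 : ((["plex", "emby", "jellyfin", "media server"].any fun k => PySem.Str.isIn k info) || (["32400", "8096", "9000"].any fun p => pl.contains p)) = true
    case pos =>
      simp only [h12, eq_self_iff_true, if_true]
      rfl
    rw [Bool.not_eq_true] at h12
    simp only [h12, Bool.false_eq_true, if_false]
    by_cases h13 : ((["vmware", "virtualbox", "qemu", "kvm", "virtual machine", "hyper-v"].any fun k => PySem.Str.isIn k info)) = true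
    case pos =>
      simp only [h13, eq_self_iff_true, if_true]
      rfl
    rw [Bool.not_eq_true] at h13
    simp only [h13, Bool.false_eq_true, if_false]
    try rfl

  case true =>
    simp only [Bool.true_and, eq_self_iff_true, if_true]
    have ckw0 : (pvKwFeat.filter (fun f => f.2 == (0 : Int))).map (fun f => f.1) = ["router", "gateway", "edge", "firewall", "broadband", "cpe"] := by rfl
    have cpt0 : (pvPortFeat.filter (fun f => f.2 == (0 : Int))).map (fun f => f.1) = ["53", "1900", "500", "4500", "1701", "80", "443", "8080", "8443"] := by rfl
    have cvn0 : (pvVenFeat.filter (fun f => f.2 == (0 : Int))).map (fun f => f.1) = ["arcadyan", "cisco", "d-link", "tp-link", "netgear", "asus", "zte", "huawei"] := by rfl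
    have e0k : PySem.Set.contains (pvHits pvKwFeat fun k => PySem.Str.isIn k info) (0 : Int) = (["router", "gateway", "edge", "firewall", "broadband", "cpe"].any fun k => PySem.Str.isIn k info) := by rw [pv_contains_hits, ckw0]
    have e0p : PySem.Set.contains (pvHits pvPortFeat fun q => pl.contains q) (0 : Int) = (["53", "1900", "500", "4500", "1701", "80", "443", "8080", "8443"].any fun p => pl.contains p) := by rw [pv_contains_hits, cpt0]
    have e0v : PySem.Set.contains (pvHits pvVenFeat fun v => PySem.Str.isIn v vlow) (0 : Int) = (["arcadyan", "cisco", "d-link", "tp-link", "netgear", "asus", "zte", "huawei"].any fun v => PySem.Str.isIn v vlow) := by rw [pv_contains_hits, cvn0]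
    simp only [e0k, e0p, e0v]
    by_cases h0 : (((["router", "gateway", "edge", "firewall", "broadband", "cpe"].any fun k => PySem.Str.isIn k info) || (["53", "1900", "500", "4500", "1701", "80", "443", "8080", "8443"].any fun p => pl.contains p)) && (["arcadyan", "cisco", "d-link", "tp-link", "netgear", "asus", "zte", "huawei"].any fun v => PySem.Str.isIn v vlow)) = true
    case pos => simp only [h0, eq_self_iff_true, if_true]
    rw [Bool.not_eq_true] at h0
    simp only [h0, Bool.false_eq_true, if_false]
    have ckw1 : (pvKwFeat.filter (fun f => f.2 == (1 : Int))).map (fun f => f.1) = ["switch", "catalyst", "layer 2", "layer 3", "dell", "juniper"] := by rfl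
    have cpt1 : (pvPortFeat.filter (fun f => f.2 == (1 : Int))).map (fun f => f.1) = [] := by rfl
    have cvn1 : (pvVenFeat.filter (fun f => f.2 == (1 : Int))).map (fun f => f.1) = ["cisco", "juniper", "dell", "hp", "netgear"] := by rfl
    have ckw2 : (pvKwFeat.filter (fun f => f.2 == (2 : Int))).map (fun f => f.1) = ["printer", "hp", "canon", "epson", "xerox"] := by rfl
    have cpt2 : (pvPortFeat.filter (fun f => f.2 == (2 : Int))).map (fun f => f.1) = ["515", "631", "9100", "9101"] := by rfl
    have cvn2 : (pvVenFeat.filter (fun f => f.2 == (2 : Int))).map (fun f => f.1) = [] := by rfl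
    have ckw3 : (pvKwFeat.filter (fun f => f.2 == (3 : Int))).map (fun f => f.1) = ["windows", "linux", "ubuntu", "mac", "microsoft", "desktop"] := by rfl
    have cpt3 : (pvPortFeat.filter (fun f => f.2 == (3 : Int))).map (fun f => f.1) = ["22", "135", "139", "445", "3389"] := by rfl
    have cvn3 : (pvVenFeat.filter (fun f => f.2 == (3 : Int))).map (fun f => f.1) = [] := by rfl
    have ckw4 : (pvKwFeat.filter (fun f => f.2 == (4 : Int))).map (fun f => f.1) = ["camera", "hikvision", "dahua", "ip camera", "axis"] := by rfl
    have cpt4 : (pvPortFeat.filter (fun f => f.2 == (4 : Int))).map (fun f => f.1) = ["554", "8080", "37777", "5000", "5001"] := by rfl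
    have cvn4 : (pvVenFeat.filter (fun f => f.2 == (4 : Int))).map (fun f => f.1) = [] := by rfl
    have ckw5 : (pvKwFeat.filter (fun f => f.2 == (5 : Int))).map (fun f => f.1) = ["access point", "ap", "aruba", "unifi", "wireless controller"] := by rfl
    have cpt5 : (pvPortFeat.filter (fun f => f.2 == (5 : Int))).map (fun f => f.1) = ["80", "443", "161", "22"] := by rfl
    have cvn5 : (pvVenFeat.filter (fun f => f.2 == (5 : Int))).map (fun f => f.1) = [] := by rfl
    have ckw6 : (pvKwFeat.filter (fun f => f.2 == (6 : Int))).map (fun f => f.1) = ["voip", "sip", "phone", "polycom"] := by rfl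
    have cpt6 : (pvPortFeat.filter (fun f => f.2 == (6 : Int))).map (fun f => f.1) = ["5060", "5061", "5062"] := by rfl
    have cvn6 : (pvVenFeat.filter (fun f => f.2 == (6 : Int))).map (fun f => f.1) = [] := by rfl
    have ckw7 : (pvKwFeat.filter (fun f => f.2 == (7 : Int))).map (fun f => f.1) = ["nas", "storage", "synology", "diskstation", "qnap"] := by rfl
    have cpt7 : (pvPortFeat.filter (fun f => f.2 == (7 : Int))).map (fun f => f.1) = ["2049", "5000", "5001", "445", "139"] := by rfl
    have cvn7 : (pvVenFeat.filter (fun f => f.2 == (7 : Int))).map (fun f => f.1) = [] := by rfl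
    have ckw8 : (pvKwFeat.filter (fun f => f.2 == (8 : Int))).map (fun f => f.1) = ["firewall", "palo alto", "fortigate", "checkpoint", "juniper"] := by rfl
    have cpt8 : (pvPortFeat.filter (fun f => f.2 == (8 : Int))).map (fun f => f.1) = [] := by rfl
    have cvn8 : (pvVenFeat.filter (fun f => f.2 == (8 : Int))).map (fun f => f.1) = [] := by rfl
    have ckw9 : (pvKwFeat.filter (fun f => f.2 == (9 : Int))).map (fun f => f.1) = ["smart tv", "samsung", "lg", "roku", "android tv"] := by rfl
    have cpt9 : (pvPortFeat.filter (fun f => f.2 == (9 : Int))).map (fun f => f.1) = ["8008", "8009", "8443", "1935", "6970"] := by rfl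
    have cvn9 : (pvVenFeat.filter (fun f => f.2 == (9 : Int))).map (fun f => f.1) = [] := by rfl
    have ckw10 : (pvKwFeat.filter (fun f => f.2 == (10 : Int))).map (fun f => f.1) = ["iot", "smart plug", "esp8266", "tuya", "espressif", "zigbee"] := by rfl
    have cpt10 : (pvPortFeat.filter (fun f => f.2 == (10 : Int))).map (fun f => f.1) = [] := by rfl
    have cvn10 : (pvVenFeat.filter (fun f => f.2 == (10 : Int))).map (fun f => f.1) = [] := by rfl
    have ckw11 : (pvKwFeat.filter (fun f => f.2 == (11 : Int))).map (fun f => f.1) = ["xbox", "playstation", "nintendo", "game console"] := by rfl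
    have cpt11 : (pvPortFeat.filter (fun f => f.2 == (11 : Int))).map (fun f => f.1) = ["3074", "3478", "3479", "3480"] := by rfl
    have cvn11 : (pvVenFeat.filter (fun f => f.2 == (11 : Int))).map (fun f => f.1) = [] := by rfl
    have ckw12 : (pvKwFeat.filter (fun f => f.2 == (12 : Int))).map (fun f => f.1) = ["plex", "emby", "jellyfin", "media server"] := by rfl
    have cpt12 : (pvPortFeat.filter (fun f => f.2 == (12 : Int))).map (fun f => f.1) = ["32400", "8096", "9000"] := by rfl
    have cvn12 : (pvVenFeat.filter (fun f => f.2 == (12 : Int))).map (fun f => f.1) = [] := by rfl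
    have ckw13 : (pvKwFeat.filter (fun f => f.2 == (13 : Int))).map (fun f => f.1) = ["vmware", "virtualbox", "qemu", "kvm", "virtual machine", "hyper-v"] := by rfl
    have cpt13 : (pvPortFeat.filter (fun f => f.2 == (13 : Int))).map (fun f => f.1) = [] := by rfl
    have cvn13 : (pvVenFeat.filter (fun f => f.2 == (13 : Int))).map (fun f => f.1) = ["vm"] := by rfl
    have hsub : ∀ x ∈ (List.filter (fun i => decide (1 ≤ i)) (((pvHits pvKwFeat fun k => PySem.Str.isIn k info).union (pvHits pvPortFeat fun q => pl.contains q)).union (pvHits pvVenFeat fun v => PySem.Str.isIn v vlow))), x ∈ ([1,2,3,4,5,6,7,8,9,10,11,12,13] : List Int) := by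
      intro x hx
      rw [List.mem_filter] at hx
      obtain ⟨hx, hx1⟩ := hx
      rw [PySem.Set.mem_union, PySem.Set.mem_union] at hx
      have hb : x ∈ ([0,1,2,3,4,5,6,7,8,9,10,11,12,13] : List Int) := by
        rcases hx with (h | h) | h
        · rcases (pv_mem_pvHits _ _ _).mp h with ⟨f, hf, _, hfx⟩
          exact hfx ▸ pv_kw_bound f hf
        · rcases (pv_mem_pvHits _ _ _).mp h with ⟨f, hf, _, hfx⟩
          exact hfx ▸ pv_pt_bound f hf
        · rcases (pv_mem_pvHits _ _ _).mp h with ⟨f, hf, _, hfx⟩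
          exact hfx ▸ pv_vn_bound f hf
      simp only [List.mem_cons, List.not_mem_nil, or_false] at hb ⊢
      simp only [decide_eq_true_eq] at hx1
      omega
    have hfind := pv_min?_eq_find? ([1,2,3,4,5,6,7,8,9,10,11,12,13] : List Int) (by decide) (List.filter (fun i => decide (1 ≤ i)) (((pvHits pvKwFeat fun k => PySem.Str.isIn k info).union (pvHits pvPortFeat fun q => pl.contains q)).union (pvHits pvVenFeat fun v => PySem.Str.isIn v vlow))) hsub
    have d1 : decide ((1 : Int) ∈ (List.filter (fun i => decide (1 ≤ i)) (((pvHits pvKwFeat fun k => PySem.Str.isIn k info).union (pvHits pvPortFeat fun q => pl.contains q)).union (pvHits pvVenFeat fun v => PySem.Str.isIn v vlow)))) = ((["switch", "catalyst", "layer 2", "layer 3", "dell", "juniper"].any fun k => PySem.Str.isIn k info) || (["cisco", "juniper", "dell", "hp", "netgear"].any fun v => PySem.Str.isIn v vlow)) := by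
      apply Bool.eq_iff_iff.mpr
      simp only [decide_eq_true_eq, List.mem_filter, PySem.Set.mem_union, pv_mem_hits_iff, ckw1, cpt1, cvn1]
      simp [PySem.Set.ofList]
      try tauto
    have d2 : decide ((2 : Int) ∈ (List.filter (fun i => decide (1 ≤ i)) (((pvHits pvKwFeat fun k => PySem.Str.isIn k info).union (pvHits pvPortFeat fun q => pl.contains q)).union (pvHits pvVenFeat fun v => PySem.Str.isIn v vlow)))) = ((["printer", "hp", "canon", "epson", "xerox"].any fun k => PySem.Str.isIn k info) || (["515", "631", "9100", "9101"].any fun p => pl.contains p)) := by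
      apply Bool.eq_iff_iff.mpr
      simp only [decide_eq_true_eq, List.mem_filter, PySem.Set.mem_union, pv_mem_hits_iff, ckw2, cpt2, cvn2]
      simp [PySem.Set.ofList]
      try tauto
    have d3 : decide ((3 : Int) ∈ (List.filter (fun i => decide (1 ≤ i)) (((pvHits pvKwFeat fun k => PySem.Str.isIn k info).union (pvHits pvPortFeat fun q => pl.contains q)).union (pvHits pvVenFeat fun v => PySem.Str.isIn v vlow)))) = ((["windows", "linux", "ubuntu", "mac", "microsoft", "desktop"].any fun k => PySem.Str.isIn k info) || (["22", "135", "139", "445", "3389"].any fun p => pl.contains p)) := by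
      apply Bool.eq_iff_iff.mpr
      simp only [decide_eq_true_eq, List.mem_filter, PySem.Set.mem_union, pv_mem_hits_iff, ckw3, cpt3, cvn3]
      simp [PySem.Set.ofList]
      try tauto
    have d4 : decide ((4 : Int) ∈ (List.filter (fun i => decide (1 ≤ i)) (((pvHits pvKwFeat fun k => PySem.Str.isIn k info).union (pvHits pvPortFeat fun q => pl.contains q)).union (pvHits pvVenFeat fun v => PySem.Str.isIn v vlow)))) = ((["camera", "hikvision", "dahua", "ip camera", "axis"].any fun k => PySem.Str.isIn k info) || (["554", "8080", "37777", "5000", "5001"].any fun p => pl.contains p)) := by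
      apply Bool.eq_iff_iff.mpr
      simp only [decide_eq_true_eq, List.mem_filter, PySem.Set.mem_union, pv_mem_hits_iff, ckw4, cpt4, cvn4]
      simp [PySem.Set.ofList]
      try tauto
    have d5 : decide ((5 : Int) ∈ (List.filter (fun i => decide (1 ≤ i)) (((pvHits pvKwFeat fun k => PySem.Str.isIn k info).union (pvHits pvPortFeat fun q => pl.contains q)).union (pvHits pvVenFeat fun v => PySem.Str.isIn v vlow)))) = ((["access point", "ap", "aruba", "unifi", "wireless controller"].any fun k => PySem.Str.isIn k info) || (["80", "443", "161", "22"].any fun p => pl.contains p)) := by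
      apply Bool.eq_iff_iff.mpr
      simp only [decide_eq_true_eq, List.mem_filter, PySem.Set.mem_union, pv_mem_hits_iff, ckw5, cpt5, cvn5]
      simp [PySem.Set.ofList]
      try tauto
    have d6 : decide ((6 : Int) ∈ (List.filter (fun i => decide (1 ≤ i)) (((pvHits pvKwFeat fun k => PySem.Str.isIn k info).union (pvHits pvPortFeat fun q => pl.contains q)).union (pvHits pvVenFeat fun v => PySem.Str.isIn v vlow)))) = ((["voip", "sip", "phone", "polycom"].any fun k => PySem.Str.isIn k info) || (["5060", "5061", "5062"].any fun p => pl.contains p)) := by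
      apply Bool.eq_iff_iff.mpr
      simp only [decide_eq_true_eq, List.mem_filter, PySem.Set.mem_union, pv_mem_hits_iff, ckw6, cpt6, cvn6]
      simp [PySem.Set.ofList]
      try tauto
    have d7 : decide ((7 : Int) ∈ (List.filter (fun i => decide (1 ≤ i)) (((pvHits pvKwFeat fun k => PySem.Str.isIn k info).union (pvHits pvPortFeat fun q => pl.contains q)).union (pvHits pvVenFeat fun v => PySem.Str.isIn v vlow)))) = ((["nas", "storage", "synology", "diskstation", "qnap"].any fun k => PySem.Str.isIn k info) || (["2049", "5000", "5001", "445", "139"].any fun p => pl.contains p)) := by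
      apply Bool.eq_iff_iff.mpr
      simp only [decide_eq_true_eq, List.mem_filter, PySem.Set.mem_union, pv_mem_hits_iff, ckw7, cpt7, cvn7]
      simp [PySem.Set.ofList]
      try tauto
    have d8 : decide ((8 : Int) ∈ (List.filter (fun i => decide (1 ≤ i)) (((pvHits pvKwFeat fun k => PySem.Str.isIn k info).union (pvHits pvPortFeat fun q => pl.contains q)).union (pvHits pvVenFeat fun v => PySem.Str.isIn v vlow)))) = ((["firewall", "palo alto", "fortigate", "checkpoint", "juniper"].any fun k => PySem.Str.isIn k info)) := by
      apply Bool.eq_iff_iff.mpr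
      simp only [decide_eq_true_eq, List.mem_filter, PySem.Set.mem_union, pv_mem_hits_iff, ckw8, cpt8, cvn8]
      simp [PySem.Set.ofList]
      try tauto
    have d9 : decide ((9 : Int) ∈ (List.filter (fun i => decide (1 ≤ i)) (((pvHits pvKwFeat fun k => PySem.Str.isIn k info).union (pvHits pvPortFeat fun q => pl.contains q)).union (pvHits pvVenFeat fun v => PySem.Str.isIn v vlow)))) = ((["smart tv", "samsung", "lg", "roku", "android tv"].any fun k => PySem.Str.isIn k info) || (["8008", "8009", "8443", "1935", "6970"].any fun p => pl.contains p)) := by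
      apply Bool.eq_iff_iff.mpr
      simp only [decide_eq_true_eq, List.mem_filter, PySem.Set.mem_union, pv_mem_hits_iff, ckw9, cpt9, cvn9]
      simp [PySem.Set.ofList]
      try tauto
    have d10 : decide ((10 : Int) ∈ (List.filter (fun i => decide (1 ≤ i)) (((pvHits pvKwFeat fun k => PySem.Str.isIn k info).union (pvHits pvPortFeat fun q => pl.contains q)).union (pvHits pvVenFeat fun v => PySem.Str.isIn v vlow)))) = ((["iot", "smart plug", "esp8266", "tuya", "espressif", "zigbee"].any fun k => PySem.Str.isIn k info)) := by
      apply Bool.eq_iff_iff.mpr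
      simp only [decide_eq_true_eq, List.mem_filter, PySem.Set.mem_union, pv_mem_hits_iff, ckw10, cpt10, cvn10]
      simp [PySem.Set.ofList]
      try tauto
    have d11 : decide ((11 : Int) ∈ (List.filter (fun i => decide (1 ≤ i)) (((pvHits pvKwFeat fun k => PySem.Str.isIn k info).union (pvHits pvPortFeat fun q => pl.contains q)).union (pvHits pvVenFeat fun v => PySem.Str.isIn v vlow)))) = ((["xbox", "playstation", "nintendo", "game console"].any fun k => PySem.Str.isIn k info) || (["3074", "3478", "3479", "3480"].any fun p => pl.contains p)) := by
      apply Bool.eq_iff_iff.mpr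
      simp only [decide_eq_true_eq, List.mem_filter, PySem.Set.mem_union, pv_mem_hits_iff, ckw11, cpt11, cvn11]
      simp [PySem.Set.ofList]
      try tauto
    have d12 : decide ((12 : Int) ∈ (List.filter (fun i => decide (1 ≤ i)) (((pvHits pvKwFeat fun k => PySem.Str.isIn k info).union (pvHits pvPortFeat fun q => pl.contains q)).union (pvHits pvVenFeat fun v => PySem.Str.isIn v vlow)))) = ((["plex", "emby", "jellyfin", "media server"].any fun k => PySem.Str.isIn k info) || (["32400", "8096", "9000"].any fun p => pl.contains p)) := by
      apply Bool.eq_iff_iff.mpr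
      simp only [decide_eq_true_eq, List.mem_filter, PySem.Set.mem_union, pv_mem_hits_iff, ckw12, cpt12, cvn12]
      simp [PySem.Set.ofList]
      try tauto
    have d13 : decide ((13 : Int) ∈ (List.filter (fun i => decide (1 ≤ i)) (((pvHits pvKwFeat fun k => PySem.Str.isIn k info).union (pvHits pvPortFeat fun q => pl.contains q)).union (pvHits pvVenFeat fun v => PySem.Str.isIn v vlow)))) = ((["vmware", "virtualbox", "qemu", "kvm", "virtual machine", "hyper-v"].any fun k => PySem.Str.isIn k info) || PySem.Str.isIn "vm" vlow) := by
      apply Bool.eq_iff_iff.mpr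
      simp only [decide_eq_true_eq, List.mem_filter, PySem.Set.mem_union, pv_mem_hits_iff, ckw13, cpt13, cvn13]
      simp [PySem.Set.ofList]
      try tauto
    rw [hfind]
    simp only [List.find?]
    simp only [d1, d2, d3, d4, d5, d6, d7, d8, d9, d10, d11, d12, d13]
    by_cases h1 : ((["switch", "catalyst", "layer 2", "layer 3", "dell", "juniper"].any fun k => PySem.Str.isIn k info) || (["cisco", "juniper", "dell", "hp", "netgear"].any fun v => PySem.Str.isIn v vlow)) = true
    case pos =>
      simp only [h1, eq_self_iff_true, if_true]
      rfl
    rw [Bool.not_eq_true] at h1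
    simp only [h1, Bool.false_eq_true, if_false]
    by_cases h2 : ((["printer", "hp", "canon", "epson", "xerox"].any fun k => PySem.Str.isIn k info) || (["515", "631", "9100", "9101"].any fun p => pl.contains p)) = true
    case pos =>
      simp only [h2, eq_self_iff_true, if_true]
      rfl
    rw [Bool.not_eq_true] at h2
    simp only [h2, Bool.false_eq_true, if_false]
    by_cases h3 : ((["windows", "linux", "ubuntu", "mac", "microsoft", "desktop"].any fun k => PySem.Str.isIn k info) || (["22", "135", "139", "445", "3389"].any fun p => pl.contains p)) = true
    case pos =>
      simp only [h3, eq_self_iff_true, if_true]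
      rfl
    rw [Bool.not_eq_true] at h3
    simp only [h3, Bool.false_eq_true, if_false]
    by_cases h4 : ((["camera", "hikvision", "dahua", "ip camera", "axis"].any fun k => PySem.Str.isIn k info) || (["554", "8080", "37777", "5000", "5001"].any fun p => pl.contains p)) = true
    case pos =>
      simp only [h4, eq_self_iff_true, if_true]
      rfl
    rw [Bool.not_eq_true] at h4
    simp only [h4, Bool.false_eq_true, if_false]
    by_cases h5 : ((["access point", "ap", "aruba", "unifi", "wireless controller"].any fun k => PySem.Str.isIn k info) || (["80", "443", "161", "22"].any fun p => pl.contains p)) = true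
    case pos =>
      simp only [h5, eq_self_iff_true, if_true]
      rfl
    rw [Bool.not_eq_true] at h5
    simp only [h5, Bool.false_eq_true, if_false]
    by_cases h6 : ((["voip", "sip", "phone", "polycom"].any fun k => PySem.Str.isIn k info) || (["5060", "5061", "5062"].any fun p => pl.contains p)) = true
    case pos =>
      simp only [h6, eq_self_iff_true, if_true]
      rfl
    rw [Bool.not_eq_true] at h6
    simp only [h6, Bool.false_eq_true, if_false]
    by_cases h7 : ((["nas", "storage", "synology", "diskstation", "qnap"].any fun k => PySem.Str.isIn k info) || (["2049", "5000", "5001", "445", "139"].any fun p => pl.contains p)) = true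
    case pos =>
      simp only [h7, eq_self_iff_true, if_true]
      rfl
    rw [Bool.not_eq_true] at h7
    simp only [h7, Bool.false_eq_true, if_false]
    by_cases h8 : ((["firewall", "palo alto", "fortigate", "checkpoint", "juniper"].any fun k => PySem.Str.isIn k info)) = true
    case pos =>
      simp only [h8, eq_self_iff_true, if_true]
      rfl
    rw [Bool.not_eq_true] at h8
    simp only [h8, Bool.false_eq_true, if_false]
    by_cases h9 : ((["smart tv", "samsung", "lg", "roku", "android tv"].any fun k => PySem.Str.isIn k info) || (["8008", "8009", "8443", "1935", "6970"].any fun p => pl.contains p)) = true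
    case pos =>
      simp only [h9, eq_self_iff_true, if_true]
      rfl
    rw [Bool.not_eq_true] at h9
    simp only [h9, Bool.false_eq_true, if_false]
    by_cases h10 : ((["iot", "smart plug", "esp8266", "tuya", "espressif", "zigbee"].any fun k => PySem.Str.isIn k info)) = true
    case pos =>
      simp only [h10, eq_self_iff_true, if_true]
      rfl
    rw [Bool.not_eq_true] at h10
    simp only [h10, Bool.false_eq_true, if_false]
    by_cases h11 : ((["xbox", "playstation", "nintendo", "game console"].any fun k => PySem.Str.isIn k info) || (["3074", "3478", "3479", "3480"].any fun p => pl.contains p)) = true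
    case pos =>
      simp only [h11, eq_self_iff_true, if_true]
      rfl
    rw [Bool.not_eq_true] at h11
    simp only [h11, Bool.false_eq_true, if_false]
    by_cases h12 : ((["plex", "emby", "jellyfin", "media server"].any fun k => PySem.Str.isIn k info) || (["32400", "8096", "9000"].any fun p => pl.contains p)) = true
    case pos =>
      simp only [h12, eq_self_iff_true, if_true]
      rfl
    rw [Bool.not_eq_true] at h12
    simp only [h12, Bool.false_eq_true, if_false]
    by_cases h13 : ((["vmware", "virtualbox", "qemu", "kvm", "virtual machine", "hyper-v"].any fun k => PySem.Str.isIn k info) || PySem.Str.isIn "vm" vlow) = true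
    case pos =>
      simp only [h13, eq_self_iff_true, if_true]
      rfl
    rw [Bool.not_eq_true] at h13
    simp only [h13, Bool.false_eq_true, if_false]
    try rfl


-- ===== VERDICT (by name: the statement is the Claim_ definition above) =====
theorem identify_device_type_spec : Claim_equal_identify_device_type := by
  intro snmp_desc nmap_os ports vendor _
  unfold Spec_identify_device_type
  exact pv_main snmp_desc nmap_os vendor ports
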